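-- pv_equiv track=rewrite | github.com/distbit0/todoListManagement | utils/utils.py | checkForUnDoneSubtasks
-- ===== SOURCE A (Python) =====
-- def checkForUnDoneSubtasks(curPos, currentIndent, totalTextLines):
--     noUndoneSubTasks = True
--     j = int(curPos) + 1
--
--     while True:
--         if len(totalTextLines) <= j:
--             break
--         tmpLine = totalTextLines[j]
--         indent = tmpLine.count("\t")
--         if indent > currentIndent:
--             if "[ ]" in tmpLine:
--                 noUndoneSubTasks = False
--         else:
--             break
--         j += 1
--     return noUndoneSubTasks
-- ===== SOURCE B (Python) =====
-- def _firstIndex(pred, xs):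
--     for i, x in enumerate(xs):
--         if pred(x):
--             return i
--     return len(xs)
--
--
-- def checkForUnDoneSubtasks(curPos, currentIndent, totalTextLines):
--     tail = totalTextLines[int(curPos) + 1:]
--     boundary = _firstIndex(lambda line: line.count("\t") <= currentIndent, tail)
--     undone = _firstIndex(lambda line: "[ ]" in line, tail)
--     return boundary <= undone
-- ===== Notes on version B (the rewrite author's own statement) =====
-- stated objective: alternative
-- what changed: instead of A's fused flag-accumulating while-loop over the block, B computes two independent positions in the tail after curPos - the first line whose indent drops to currentIndent (block boundary) and the first line containing '[ ]' - and answers by comparing the two indices (boundary <= undone)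
-- intended difference: when curPos+1 is negative but >= -len, A wraps via Python negative indexing and, if every wrapped-to tail line is a deeper-indented done line, rescans from line 0 and can report an undone subtask from the TOP of the list (returning False); B reads only the lines after the sliced position and returns True, the intended answer for 'undone subtasks below this position' — e.g. on checkForUnDoneSubtasks(-2, 0, ["\ta [ ]", "\tb"]): A returns false, B returns true
import Mathlib
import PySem

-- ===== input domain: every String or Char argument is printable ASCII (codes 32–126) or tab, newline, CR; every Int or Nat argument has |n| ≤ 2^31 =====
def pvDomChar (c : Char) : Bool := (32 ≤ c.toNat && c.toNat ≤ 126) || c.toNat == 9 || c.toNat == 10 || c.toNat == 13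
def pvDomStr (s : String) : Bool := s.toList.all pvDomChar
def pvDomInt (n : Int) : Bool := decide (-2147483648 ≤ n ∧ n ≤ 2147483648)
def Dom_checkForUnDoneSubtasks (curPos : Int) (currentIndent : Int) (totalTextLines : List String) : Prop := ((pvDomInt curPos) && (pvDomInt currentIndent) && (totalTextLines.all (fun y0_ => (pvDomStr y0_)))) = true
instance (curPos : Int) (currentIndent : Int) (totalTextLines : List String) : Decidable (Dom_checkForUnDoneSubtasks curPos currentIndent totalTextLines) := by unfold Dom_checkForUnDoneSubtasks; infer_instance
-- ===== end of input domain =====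

-- B replaces A's fused flag-accumulating while-loop by two independent first-index searches in the
-- tail (block boundary vs first '[ ]' line) compared as numbers (objective: alternative);
-- on negative curPos+1 A wraps via Python negative indexing (see D_ below), B reads only the sliced tail.

-- ===== PORT A =====
-- the loop's tests: 'tmpLine.count("\t") > currentIndent' / '"[ ]" in tmpLine'
def pvDeeper (currentIndent : Int) (tmpLine : String) : Bool :=
  decide (currentIndent < (PySem.Str.count tmpLine "\t" : Int))
def pvUndone (tmpLine : String) : Bool := PySem.Str.isIn "[ ]" tmpLine

-- the while-loop: fuel = number of remaining indices before len(totalTextLines) <= j (break);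
-- pyGet? none = IndexError (only reachable outside Pre_)
def pvALoop (totalTextLines : List String) (currentIndent : Int) (noUndoneSubTasks : Bool) (j : Int) : Nat → Bool
  | 0 => noUndoneSubTasks
  | fuel + 1 =>
    match PySem.List.pyGet? totalTextLines j with
    | none => noUndoneSubTasks
    | some tmpLine =>
      if pvDeeper currentIndent tmpLine then
        pvALoop totalTextLines currentIndent
          (if pvUndone tmpLine then false else noUndoneSubTasks) (j + 1) fuel
      else noUndoneSubTasks

def checkForUnDoneSubtasks (curPos : Int) (currentIndent : Int) (totalTextLines : List String) : Bool :=
  pvALoop totalTextLines currentIndent true (curPos + 1)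
    ((totalTextLines.length - (curPos + 1)).toNat)

-- ===== PORT B =====
-- Source B's _firstIndex: index of the first element satisfying pred, else len(xs)
def pvFirstIndex (pred : String → Bool) : List String → Nat
  | [] => 0
  | x :: rest => if pred x then 0 else pvFirstIndex pred rest + 1

def checkForUnDoneSubtasks_alt (curPos : Int) (currentIndent : Int) (totalTextLines : List String) : Bool :=
  let tail := PySem.List.slice totalTextLines (some (curPos + 1)) none
  let boundary := pvFirstIndex (fun line => decide ((PySem.Str.count line "\t" : Int) ≤ currentIndent)) tail
  let undone := pvFirstIndex (fun line => pvUndone line) tail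
  decide (boundary ≤ undone)

-- ===== PRECONDITION & SPEC =====
-- Pre_ excludes exactly the inputs where A raises IndexError: curPos + 1 < -len(totalTextLines)
def Pre_checkForUnDoneSubtasks (curPos : Int) (currentIndent : Int) (totalTextLines : List String) : Prop :=
  -(totalTextLines.length : Int) ≤ curPos + 1
instance (curPos : Int) (currentIndent : Int) (totalTextLines : List String) : Decidable (Pre_checkForUnDoneSubtasks curPos currentIndent totalTextLines) := by unfold Pre_checkForUnDoneSubtasks; infer_instance

def pvWitness_checkForUnDoneSubtasks : Int × Int × List String := (0, 0, ["a"])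

-- when curPos+1 is negative (but >= -len, so A returns), A wraps via Python negative indexing; if every
-- tail line is a deeper-indented done line A rescans from line 0 and can report an undone subtask from
-- the TOP of the list (returning False), while B reads only the lines after the sliced position and
-- returns True — the intended answer for 'undone subtasks below this position'.
def D_checkForUnDoneSubtasks (curPos : Int) (currentIndent : Int) (totalTextLines : List String) : Prop :=
  curPos < -1 ∧
  (PySem.List.slice totalTextLines (some (curPos + 1))).all
    (fun l => pvDeeper currentIndent l && !pvUndone l) = true ∧
  (totalTextLines.takeWhile (pvDeeper currentIndent)).any pvUndone = true
instance (curPos : Int) (currentIndent : Int) (totalTextLines : List String) : Decidable (D_checkForUnDoneSubtasks curPos currentIndent totalTextLines) := by unfold D_checkForUnDoneSubtasks; infer_instance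

def Spec_checkForUnDoneSubtasks (curPos : Int) (currentIndent : Int) (totalTextLines : List String) (out : Bool) : Prop := ¬ D_checkForUnDoneSubtasks curPos currentIndent totalTextLines → out = checkForUnDoneSubtasks_alt curPos currentIndent totalTextLines
instance (curPos : Int) (currentIndent : Int) (totalTextLines : List String) (out : Bool) : Decidable (Spec_checkForUnDoneSubtasks curPos currentIndent totalTextLines out) := by unfold Spec_checkForUnDoneSubtasks; infer_instance

def pvDiffWitness_checkForUnDoneSubtasks : Int × Int × List String := (-2, 0, ["\ta [ ]", "\tb"])
def pvDiffWitnessOut_checkForUnDoneSubtasks : Bool × Bool := (false, true)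

-- ===== CLAIM (what is proved, stated in full; the proofs are below) =====
def Claim_unchanged_checkForUnDoneSubtasks : Prop := ∀ (curPos : Int) (currentIndent : Int) (totalTextLines : List String), Dom_checkForUnDoneSubtasks curPos currentIndent totalTextLines → Pre_checkForUnDoneSubtasks curPos currentIndent totalTextLines → Spec_checkForUnDoneSubtasks curPos currentIndent totalTextLines (checkForUnDoneSubtasks curPos currentIndent totalTextLines)
def Claim_changed_checkForUnDoneSubtasks : Prop := Dom_checkForUnDoneSubtasks (pvDiffWitness_checkForUnDoneSubtasks.1) (pvDiffWitness_checkForUnDoneSubtasks.2.1) (pvDiffWitness_checkForUnDoneSubtasks.2.2) ∧ Pre_checkForUnDoneSubtasks (pvDiffWitness_checkForUnDoneSubtasks.1) (pvDiffWitness_checkForUnDoneSubtasks.2.1) (pvDiffWitness_checkForUnDoneSubtasks.2.2) ∧ D_checkForUnDoneSubtasks (pvDiffWitness_checkForUnDoneSubtasks.1) (pvDiffWitness_checkForUnDoneSubtasks.2.1) (pvDiffWitness_checkForUnDoneSubtasks.2.2) ∧ checkForUnDoneSubtasks (pvDiffWitness_checkForUnDoneSubtasks.1) (pvDiffWitness_checkForUnDoneSubtasks.2.1)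 (pvDiffWitness_checkForUnDoneSubtasks.2.2) = pvDiffWitnessOut_checkForUnDoneSubtasks.1 ∧ checkForUnDoneSubtasks_alt (pvDiffWitness_checkForUnDoneSubtasks.1) (pvDiffWitness_checkForUnDoneSubtasks.2.1) (pvDiffWitness_checkForUnDoneSubtasks.2.2) = pvDiffWitnessOut_checkForUnDoneSubtasks.2 ∧ pvDiffWitnessOut_checkForUnDoneSubtasks.1 ≠ pvDiffWitnessOut_checkForUnDoneSubtasks.2
def Claim_exact_checkForUnDoneSubtasks : Prop := ∀ (curPos : Int) (currentIndent : Int) (totalTextLines : List String), Dom_checkForUnDoneSubtasks curPos currentIndent totalTextLines → Pre_checkForUnDoneSubtasks curPos currentIndent totalTextLines → D_checkForUnDoneSubtasks curPos currentIndent totalTextLines → checkForUnDoneSubtasks curPos currentIndent totalTextLines ≠ checkForUnDoneSubtasks_alt curPos currentIndent totalTextLines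

-- ===== LEMMAS AND PROOFS =====

-- A's loop on a nonnegative start index k is acc AND 'no [ ] in the deeper-indented block of drop k'
lemma pvALoop_nonneg (lines : List String) (ci : Int) :
    ∀ (suffix : List String) (k : Nat) (acc : Bool), lines.drop k = suffix →
      pvALoop lines ci acc (k : Int) (lines.length - k) =
        (acc && (suffix.takeWhile (fun l => decide (ci < (PySem.Str.count l "\t" : Int)))).all
          (fun l => !PySem.Str.isIn "[ ]" l)) := by
  intro suffix
  induction suffix with
  | nil =>
    intro k acc hdrop
    have hk : lines.length ≤ k := List.drop_eq_nil_iff.mp hdrop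
    have : lines.length - k = 0 := by omega
    rw [this]
    simp [pvALoop]
  | cons x rest ih =>
    intro k acc hdrop
    have hk : k < lines.length := by
      by_contra h
      rw [List.drop_eq_nil_iff.mpr (by omega)] at hdrop
      exact (List.cons_ne_nil x rest) hdrop.symm
    have hx : lines[k]? = some x := by
      have := List.getElem?_drop (xs := lines) (i := k) (j := 0)
      rw [hdrop] at this
      simpa using this.symm
    have hfuel : lines.length - k = (lines.length - (k + 1)) + 1 := by omega
    rw [hfuel]
    have hrest : lines.drop (k + 1) = rest := by
      have := List.tail_drop (l := lines) (i := k)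
      rw [hdrop] at this
      simpa using this.symm
    simp only [pvALoop, pvDeeper, pvUndone, PySem.List.pyGet?_natCast, hx]
    by_cases hp : ci < (PySem.Str.count x "\t" : Int)
    · rw [if_pos (by simpa using hp)]
      have hcast : ((k : Int) + 1) = ((k + 1 : Nat) : Int) := by push_cast; ring
      rw [hcast, ih (k + 1) _ hrest]
      rw [List.takeWhile_cons_of_pos (by simpa using hp)]
      simp only [List.all_cons]
      rcases Bool.eq_false_or_eq_true (PySem.Str.isIn "[ ]" x) with hq | hq <;>
        · obtain hq' : PySem.Chars.isIn ['[', ' ', ']'] x.toList = _ := by simpa using hq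
          simp [hq', Bool.and_assoc, Bool.and_comm, Bool.and_left_comm]
    · rw [if_neg (by simpa using hp)]
      rw [List.takeWhile_cons_of_neg (by simpa using hp)]
      simp

-- A's loop on a negative start -m (m ≤ len) visits drop (len-m) and then wraps to the whole list
lemma pvALoop_neg (lines : List String) (ci : Int) :
    ∀ (m : Nat) (acc : Bool), m ≤ lines.length →
      pvALoop lines ci acc (-(m : Int)) (lines.length + m) =
        (acc && (((lines.drop (lines.length - m)) ++ lines).takeWhile
            (fun l => decide (ci < (PySem.Str.count l "\t" : Int)))).all
          (fun l => !PySem.Str.isIn "[ ]" l)) := by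
  intro m
  induction m with
  | zero =>
    intro acc _
    have h0 : (-((0 : Nat) : Int)) = ((0 : Nat) : Int) := by simp
    have hf : lines.length + 0 = lines.length - 0 := by omega
    rw [h0, hf, pvALoop_nonneg lines ci lines 0 acc (by simp)]
    simp
  | succ m ih =>
    intro acc hm
    have hk : lines.length - (m + 1) < lines.length := by omega
    have hget : PySem.List.pyGet? lines (-((m + 1 : Nat) : Int)) = lines[lines.length - (m + 1)]? := by
      exact PySem.List.pyGet?_neg_natCast lines (m + 1) (by omega) (by omega)
    have hx : lines[lines.length - (m + 1)]? = some lines[lines.length - (m + 1)] :=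
      List.getElem?_eq_getElem hk
    have hfuel : lines.length + (m + 1) = (lines.length + m) + 1 := by omega
    rw [hfuel]
    simp only [pvALoop, pvDeeper, pvUndone, hget, hx]
    set x := lines[lines.length - (m + 1)] with hxdef
    have hdropcons : lines.drop (lines.length - (m + 1)) = x :: lines.drop (lines.length - m) := by
      have hidx : lines.length - (m + 1) + 1 = lines.length - m := by omega
      rw [List.drop_eq_getElem_cons hk, hidx]
    by_cases hp : ci < (PySem.Str.count x "\t" : Int)
    · rw [if_pos (by simpa using hp)]
      have hcast : (-((m + 1 : Nat) : Int) + 1) = -((m : Nat) : Int) := by push_cast; ring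
      rw [hcast, ih _ (by omega)]
      rw [hdropcons, List.cons_append, List.takeWhile_cons_of_pos (by simpa using hp)]
      simp only [List.all_cons]
      rcases Bool.eq_false_or_eq_true (PySem.Str.isIn "[ ]" x) with hq | hq <;>
        · obtain hq' : PySem.Chars.isIn ['[', ' ', ']'] x.toList = _ := by simpa using hq
          simp [hq', Bool.and_assoc, Bool.and_comm, Bool.and_left_comm]
    · rw [if_neg (by simpa using hp)]
      rw [hdropcons, List.cons_append, List.takeWhile_cons_of_neg (by simpa using hp)]
      simp

-- B's index comparison: first-boundary ≤ first-undone iff the kept (non-boundary) block has no undone line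
lemma pvFirstIndex_le_iff_gen (p q : String → Bool) :
    ∀ (tail : List String),
      decide (pvFirstIndex p tail ≤ pvFirstIndex q tail) =
      (tail.takeWhile (fun l => !p l)).all (fun l => !q l) := by
  intro tail
  induction tail with
  | nil => simp [pvFirstIndex]
  | cons x rest ih =>
    cases hp : p x
    · cases hq : q x
      · simp only [pvFirstIndex, hp, hq, Bool.false_eq_true, if_false, List.takeWhile_cons,
          Bool.not_false, if_true, List.all_cons, Bool.true_and]
        rw [← ih]
        simp
      · simp [pvFirstIndex, hp, hq, List.takeWhile_cons]
    · simp [pvFirstIndex, hp, List.takeWhile_cons]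

-- B = 'no [ ] in the deeper-indented block of the sliced tail'
lemma alt_eq (curPos ci : Int) (lines : List String) :
    checkForUnDoneSubtasks_alt curPos ci lines =
      (((PySem.List.slice lines (some (curPos + 1)) none).takeWhile
          (fun l => decide (ci < (PySem.Str.count l "\t" : Int)))).all
        (fun l => !PySem.Str.isIn "[ ]" l)) := by
  unfold checkForUnDoneSubtasks_alt
  dsimp only
  rw [pvFirstIndex_le_iff_gen]
  have hfun : (fun l => !(decide ((PySem.Str.count l "\t" : Int) ≤ ci))) =
      (fun l => decide (ci < (PySem.Str.count l "\t" : Int))) := by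
    funext l
    rw [← decide_not]
    simp [not_le]
  rw [hfun]
  simp [pvUndone]

-- outside D_'s 'tail all deep-and-done, list top has a deep undone line', the wrapped scan adds nothing
lemma agree_append (suffix rest : List String) (p q : String → Bool)
    (h : ¬ ((suffix.all (fun l => p l && !q l)) = true ∧ ((rest.takeWhile p).any q) = true)) :
    (((suffix ++ rest).takeWhile p).all (fun l => !q l)) =
      ((suffix.takeWhile p).all (fun l => !q l)) := by
  by_cases hall : suffix.all p
  · have hself : suffix.takeWhile p = suffix :=
      List.takeWhile_eq_self_iff.mpr (by simpa [List.all_eq_true] using hall)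
    rw [List.takeWhile_append, if_pos (by rw [hself]), List.all_append, hself]
    by_cases hq : suffix.all (fun l => !q l)
    · have hpq : suffix.all (fun l => p l && !q l) = true := by
        simp only [List.all_eq_true] at hall hq ⊢
        intro l hl
        simp [hall l hl, hq l hl]
      have hany : (rest.takeWhile p).any q = false := by
        rcases Bool.eq_false_or_eq_true ((rest.takeWhile p).any q) with h' | h'
        · exact absurd ⟨hpq, h'⟩ h
        · exact h'
      have : (rest.takeWhile p).all (fun l => !q l) = true := by
        simp only [List.all_eq_true]
        intro l hl
        simp only [List.any_eq_false] at hany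
        simp [hany l hl]
      rw [hq, this]
      rfl
    · rw [Bool.eq_false_iff.mpr hq]
      simp
  · have hne : (suffix.takeWhile p).length ≠ suffix.length := by
      intro hlen
      apply hall
      have hself := (List.takeWhile_prefix (l := suffix) p).eq_of_length hlen
      exact List.all_eq_true.mpr fun x hx => List.takeWhile_eq_self_iff.mp hself x hx
    rw [List.takeWhile_append, if_neg hne]

-- ===== VERDICT (by name: the statement is the Claim_ definition above) =====
theorem checkForUnDoneSubtasks_spec : Claim_unchanged_checkForUnDoneSubtasks := by
  intro curPos ci lines _ hpre hnd
  unfold D_checkForUnDoneSubtasks at hnd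
  rw [alt_eq]
  by_cases hsign : 0 ≤ curPos + 1
  · -- nonnegative start: both read the plain suffix
    obtain ⟨k, hk⟩ : ∃ k : Nat, curPos + 1 = (k : Int) := ⟨(curPos + 1).toNat, by omega⟩
    unfold checkForUnDoneSubtasks
    rw [hk]
    have hfuel : ((lines.length : Int) - (k : Int)).toNat = lines.length - k := by omega
    rw [hfuel, pvALoop_nonneg lines ci (lines.drop k) k true rfl, Bool.true_and]
    rw [PySem.List.slice_from lines (by omega)]
    simp
  · -- negative start inside Pre_: A wraps, but agrees outside D_
    push_neg at hsign
    set m : Nat := (-(curPos + 1)).toNat with hmdef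
    have hmn : m ≤ lines.length := by
      unfold Pre_checkForUnDoneSubtasks at hpre
      omega
    have hk : curPos + 1 = -(m : Int) := by omega
    unfold checkForUnDoneSubtasks
    rw [hk]
    have hfuel' : ((lines.length : Int) - -(m : Int)).toNat = lines.length + m := by omega
    rw [hfuel', pvALoop_neg lines ci m true hmn]
    rw [PySem.List.slice_from_neg_natCast lines m (by omega), Bool.true_and]
    rw [hk, PySem.List.slice_from_neg_natCast lines m (by omega)] at hnd
    apply agree_append
    rintro ⟨h1, h2⟩
    refine hnd ⟨by omega, ?_, ?_⟩
    · simpa [pvDeeper, pvUndone] using h1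
    · simpa [pvDeeper, pvUndone] using h2

theorem checkForUnDoneSubtasks_changed : Claim_changed_checkForUnDoneSubtasks := by
  unfold Claim_changed_checkForUnDoneSubtasks; decide

theorem checkForUnDoneSubtasks_tight : Claim_exact_checkForUnDoneSubtasks := by
  intro curPos ci lines _ hpre hD
  unfold D_checkForUnDoneSubtasks at hD
  obtain ⟨hneg, hall, hany⟩ := hD
  set m : Nat := (-(curPos + 1)).toNat with hmdef
  have hmn : m ≤ lines.length := by
    unfold Pre_checkForUnDoneSubtasks at hpre
    omega
  have hk : curPos + 1 = -(m : Int) := by omega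
  rw [hk, PySem.List.slice_from_neg_natCast lines m (by omega)] at hall
  replace hall : ((lines.drop (lines.length - m)).all
      (fun l => decide (ci < (PySem.Str.count l "\t" : Int)) && !PySem.Str.isIn "[ ]" l)) = true := by
    simpa [pvDeeper, pvUndone] using hall
  replace hany : ((lines.takeWhile (fun l => decide (ci < (PySem.Str.count l "\t" : Int)))).any
      (fun l => PySem.Str.isIn "[ ]" l)) = true := by
    simpa [pvDeeper, pvUndone] using hany
  set suffix := lines.drop (lines.length - m) with hsufdef
  have hsufall : suffix.all (fun l => decide (ci < (PySem.Str.count l "\t" : Int))) = true := by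
    simp only [List.all_eq_true] at hall ⊢
    intro l hl
    have h := hall l hl
    rw [Bool.and_eq_true] at h
    simpa using h.1
  have hsufdone : suffix.all (fun l => !PySem.Str.isIn "[ ]" l) = true := by
    simp only [List.all_eq_true] at hall ⊢
    intro l hl
    have h := hall l hl
    rw [Bool.and_eq_true] at h
    simpa using h.2
  have hself : suffix.takeWhile (fun l => decide (ci < (PySem.Str.count l "\t" : Int))) = suffix :=
    List.takeWhile_eq_self_iff.mpr (by simpa [List.all_eq_true] using hsufall)
  -- A returns false: the wrapped rescan reaches the undone line at the top
  have hA : checkForUnDoneSubtasks curPos ci lines = false := by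
    unfold checkForUnDoneSubtasks
    rw [hk]
    have hfuel : ((lines.length : Int) - -(m : Int)).toNat = lines.length + m := by omega
    rw [hfuel, pvALoop_neg lines ci m true hmn]
    rw [List.takeWhile_append, if_pos (by rw [hself]), List.all_append]
    have hfalse : (lines.takeWhile (fun l => decide (ci < (PySem.Str.count l "\t" : Int)))).all
        (fun l => !PySem.Str.isIn "[ ]" l) = false := by
      rcases List.any_eq_true.mp hany with ⟨l, hl, hq⟩
      rcases Bool.eq_false_or_eq_true ((lines.takeWhile
          (fun l => decide (ci < (PySem.Str.count l "\t" : Int)))).all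
          (fun l => !PySem.Str.isIn "[ ]" l)) with h' | h'
      · rw [List.all_eq_true] at h'
        have hc : PySem.Chars.isIn ['[', ' ', ']'] l.toList = true := by simpa using hq
        have hc' : PySem.Chars.isIn ['[', ' ', ']'] l.toList = false := by simpa using h' l hl
        rw [hc] at hc'
        cases hc'
      · exact h'
    rw [hfalse]
    simp
  -- B returns true: the sliced tail is all deeper-indented done lines
  have hB : checkForUnDoneSubtasks_alt curPos ci lines = true := by
    rw [alt_eq, hk, PySem.List.slice_from_neg_natCast lines m (by omega), ← hsufdef, hself, hsufdone]
  rw [hA, hB]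
  simp
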